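-- pv_equiv track=rewrite | github.com/daliakamalzadeh/Minecraft_PCG | house.py | shift_rect_off_reserved
-- ===== SOURCE A (Python) =====
-- def rect_intersects_reserved(x1: int, x2: int, z1: int, z2: int, reserved: set):
--     return any((bx, bz) in reserved for bx in range(x1, x2 + 1) for bz in range(z1, z2 + 1))
--
-- def shift_rect_off_reserved(cx: int, cz: int, lx: int, lz: int, reserved: set,
--                              min_x: int, max_x: int, min_z: int, max_z: int,
--                              shift_axis: str = 'x'):
--     for delta in [0, 1, -1, 2, -2, 3, -3, 4, -4]:
--         ncx, ncz = cx, cz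
--         if shift_axis == 'x':
--             ncx += delta
--         else:
--             ncz += delta
--         x1, x2 = ncx - lx // 2, ncx - lx // 2 + lx - 1
--         z1, z2 = ncz - lz // 2, ncz - lz // 2 + lz - 1
--         if x1 < min_x or x2 > max_x or z1 < min_z or z2 > max_z:
--             continue
--         if not rect_intersects_reserved(x1, x2, z1, z2, reserved):
--             return ncx, ncz
--     return cx, cz
-- ===== SOURCE B (Python) =====
-- def shift_rect_off_reserved(cx: int, cz: int, lx: int, lz: int, reserved: set,
--                              min_x: int, max_x: int, min_z: int, max_z: int,
--                              shift_axis: str = 'x'):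
--     def placed(delta):
--         ncx = cx + delta if shift_axis == 'x' else cx
--         ncz = cz if shift_axis == 'x' else cz + delta
--         x1 = ncx - lx // 2
--         x2 = x1 + lx - 1
--         z1 = ncz - lz // 2
--         z2 = z1 + lz - 1
--         if x1 < min_x or x2 > max_x or z1 < min_z or z2 > max_z:
--             return False
--         return not any(x1 <= bx <= x2 and z1 <= bz <= z2 for (bx, bz) in reserved)
--
--     hit = next((d for d in (0, 1, -1, 2, -2, 3, -3, 4, -4) if placed(d)), None)
--     if hit is None:
--         return cx, cz
--     return (cx + hit, cz) if shift_axis == 'x' else (cx, cz + hit)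
-- ===== Notes on version B (the rewrite author's own statement) =====
-- stated objective: alternative
-- what changed: Inverts the intersection test (scan the reserved points against the rectangle bounds instead of materialising and scanning every rectangle cell) and replaces the explicit delta loop with a next()/find? over the candidate deltas; cost per delta becomes O(|reserved|) instead of O(lx*lz).
import Mathlib
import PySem

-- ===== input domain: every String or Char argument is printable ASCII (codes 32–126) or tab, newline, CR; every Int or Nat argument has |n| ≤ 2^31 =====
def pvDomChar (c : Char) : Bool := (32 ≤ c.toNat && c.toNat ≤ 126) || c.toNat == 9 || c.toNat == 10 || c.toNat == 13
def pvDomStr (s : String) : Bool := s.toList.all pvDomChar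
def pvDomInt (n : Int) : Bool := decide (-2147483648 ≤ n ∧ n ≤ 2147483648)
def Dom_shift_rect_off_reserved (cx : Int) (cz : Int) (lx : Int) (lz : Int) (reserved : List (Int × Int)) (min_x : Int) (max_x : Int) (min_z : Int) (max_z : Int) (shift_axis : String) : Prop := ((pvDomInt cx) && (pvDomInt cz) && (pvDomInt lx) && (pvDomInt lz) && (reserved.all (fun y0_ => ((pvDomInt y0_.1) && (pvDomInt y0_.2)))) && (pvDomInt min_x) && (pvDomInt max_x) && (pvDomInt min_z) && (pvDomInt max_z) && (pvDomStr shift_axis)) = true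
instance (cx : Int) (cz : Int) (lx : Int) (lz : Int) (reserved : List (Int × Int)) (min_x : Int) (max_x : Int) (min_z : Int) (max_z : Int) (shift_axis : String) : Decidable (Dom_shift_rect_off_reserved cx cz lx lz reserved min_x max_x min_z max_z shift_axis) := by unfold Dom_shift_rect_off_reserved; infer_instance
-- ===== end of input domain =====

-- B inverts the per-delta intersection test (scan reserved points against the rectangle bounds
-- instead of scanning all rectangle cells) and replaces the explicit loop with next/find? over the deltas;
-- objective: alternative (the rectangle is never materialised; per-delta cost is O(reserved) not O(lx*lz)).

-- ===== PORT A =====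
def rect_intersects_reserved (x1 : Int) (x2 : Int) (z1 : Int) (z2 : Int) (reserved : List (Int × Int)) : Bool :=
  (PySem.List.pyRange x1 (x2 + 1) 1).any (fun bx =>
    (PySem.List.pyRange z1 (z2 + 1) 1).any (fun bz => reserved.contains (bx, bz)))

def shiftLoopA (cx : Int) (cz : Int) (lx : Int) (lz : Int) (reserved : List (Int × Int))
    (min_x : Int) (max_x : Int) (min_z : Int) (max_z : Int) (shift_axis : String)
    (deltas : List Int) : Int × Int :=
  match deltas with
  | [] => (cx, cz)
  | delta :: rest =>
    let ncx := if shift_axis == "x" then cx + delta else cx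
    let ncz := if shift_axis == "x" then cz else cz + delta
    let x1 := ncx - PySem.Int.floordiv lx 2
    let x2 := ncx - PySem.Int.floordiv lx 2 + lx - 1
    let z1 := ncz - PySem.Int.floordiv lz 2
    let z2 := ncz - PySem.Int.floordiv lz 2 + lz - 1
    if x1 < min_x || x2 > max_x || z1 < min_z || z2 > max_z then
      shiftLoopA cx cz lx lz reserved min_x max_x min_z max_z shift_axis rest
    else if !rect_intersects_reserved x1 x2 z1 z2 reserved then
      (ncx, ncz)
    else
      shiftLoopA cx cz lx lz reserved min_x max_x min_z max_z shift_axis rest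

def shift_rect_off_reserved (cx : Int) (cz : Int) (lx : Int) (lz : Int) (reserved : List (Int × Int)) (min_x : Int) (max_x : Int) (min_z : Int) (max_z : Int) (shift_axis : String) : Int × Int :=
  shiftLoopA cx cz lx lz reserved min_x max_x min_z max_z shift_axis [0, 1, -1, 2, -2, 3, -3, 4, -4]

-- ===== PORT B =====
def placedB (cx : Int) (cz : Int) (lx : Int) (lz : Int) (reserved : List (Int × Int))
    (min_x : Int) (max_x : Int) (min_z : Int) (max_z : Int) (shift_axis : String)
    (delta : Int) : Bool :=
  let ncx := if shift_axis == "x" then cx + delta else cx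
  let ncz := if shift_axis == "x" then cz else cz + delta
  let x1 := ncx - PySem.Int.floordiv lx 2
  let x2 := x1 + lx - 1
  let z1 := ncz - PySem.Int.floordiv lz 2
  let z2 := z1 + lz - 1
  if x1 < min_x || x2 > max_x || z1 < min_z || z2 > max_z then
    false
  else
    !(reserved.any (fun p => decide (x1 ≤ p.1) && decide (p.1 ≤ x2) && decide (z1 ≤ p.2) && decide (p.2 ≤ z2)))

def shift_rect_off_reserved_alt (cx : Int) (cz : Int) (lx : Int) (lz : Int) (reserved : List (Int × Int)) (min_x : Int) (max_x : Int) (min_z : Int) (max_z : Int) (shift_axis : String) : Int × Int :=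
  match ([0, 1, -1, 2, -2, 3, -3, 4, -4] : List Int).find?
      (placedB cx cz lx lz reserved min_x max_x min_z max_z shift_axis) with
  | none => (cx, cz)
  | some hit => if shift_axis == "x" then (cx + hit, cz) else (cx, cz + hit)

-- ===== PRECONDITION & SPEC =====
def Spec_shift_rect_off_reserved (cx : Int) (cz : Int) (lx : Int) (lz : Int) (reserved : List (Int × Int)) (min_x : Int) (max_x : Int) (min_z : Int) (max_z : Int) (shift_axis : String) (out : Int × Int) : Prop := out = shift_rect_off_reserved_alt cx cz lx lz reserved min_x max_x min_z max_z shift_axis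
instance (cx : Int) (cz : Int) (lx : Int) (lz : Int) (reserved : List (Int × Int)) (min_x : Int) (max_x : Int) (min_z : Int) (max_z : Int) (shift_axis : String) (out : Int × Int) : Decidable (Spec_shift_rect_off_reserved cx cz lx lz reserved min_x max_x min_z max_z shift_axis out) := by unfold Spec_shift_rect_off_reserved; infer_instance

-- ===== CLAIM (what is proved, stated in full; the proofs are below) =====
def Claim_equal_shift_rect_off_reserved : Prop := ∀ (cx : Int) (cz : Int) (lx : Int) (lz : Int) (reserved : List (Int × Int)) (min_x : Int) (max_x : Int) (min_z : Int) (max_z : Int) (shift_axis : String), Dom_shift_rect_off_reserved cx cz lx lz reserved min_x max_x min_z max_z shift_axis → Spec_shift_rect_off_reserved cx cz lx lz reserved min_x max_x min_z max_z shift_axis (shift_rect_off_reserved cx cz lx lz reserved min_x max_x min_z max_z shift_axis)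

-- ===== LEMMAS AND PROOFS =====

-- The two intersection tests agree: some rectangle cell is reserved iff some reserved
-- point lies within the (inclusive) rectangle bounds.
theorem rect_intersects_eq (x1 x2 z1 z2 : Int) (reserved : List (Int × Int)) :
    rect_intersects_reserved x1 x2 z1 z2 reserved =
      reserved.any (fun p => decide (x1 ≤ p.1) && decide (p.1 ≤ x2) && decide (z1 ≤ p.2) && decide (p.2 ≤ z2)) := by
  have h : rect_intersects_reserved x1 x2 z1 z2 reserved = true ↔
      (reserved.any (fun p => decide (x1 ≤ p.1) && decide (p.1 ≤ x2) && decide (z1 ≤ p.2) && decide (p.2 ≤ z2))) = true := by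
    simp only [rect_intersects_reserved, List.any_eq_true, PySem.List.mem_pyRange_one,
      List.contains_iff_mem, Bool.and_eq_true, decide_eq_true_eq]
    constructor
    · rintro ⟨bx, ⟨h1, h2⟩, bz, ⟨h3, h4⟩, hmem⟩
      exact ⟨(bx, bz), hmem, by constructor; constructor; constructor; all_goals omega⟩
    · rintro ⟨⟨bx, bz⟩, hmem, ⟨⟨⟨h1, h2⟩, h3⟩, h4⟩⟩
      exact ⟨bx, ⟨h1, by omega⟩, bz, ⟨h3, by omega⟩, hmem⟩
  rcases Bool.eq_false_or_eq_true (rect_intersects_reserved x1 x2 z1 z2 reserved) with hl | hl <;>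
    rcases Bool.eq_false_or_eq_true (reserved.any (fun p => decide (x1 ≤ p.1) && decide (p.1 ≤ x2) && decide (z1 ≤ p.2) && decide (p.2 ≤ z2))) with hr | hr <;>
    simp_all <;> try assumption

-- One step of A's loop, phrased through B's per-delta predicate.
theorem loop_step (cx cz lx lz : Int) (reserved : List (Int × Int))
    (min_x max_x min_z max_z : Int) (shift_axis : String) (d : Int) (rest : List Int) :
    shiftLoopA cx cz lx lz reserved min_x max_x min_z max_z shift_axis (d :: rest) =
      if placedB cx cz lx lz reserved min_x max_x min_z max_z shift_axis d then
        (if shift_axis == "x" then (cx + d, cz) else (cx, cz + d))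
      else shiftLoopA cx cz lx lz reserved min_x max_x min_z max_z shift_axis rest := by
  by_cases hax : shift_axis == "x" <;>
    simp only [shiftLoopA, placedB, rect_intersects_eq, hax, if_true, if_false,
      Bool.false_eq_true] <;>
    split_ifs <;> simp_all

theorem loop_eq_find (cx cz lx lz : Int) (reserved : List (Int × Int))
    (min_x max_x min_z max_z : Int) (shift_axis : String) (deltas : List Int) :
    shiftLoopA cx cz lx lz reserved min_x max_x min_z max_z shift_axis deltas =
      match deltas.find? (placedB cx cz lx lz reserved min_x max_x min_z max_z shift_axis) with
      | none => (cx, cz)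
      | some hit => if shift_axis == "x" then (cx + hit, cz) else (cx, cz + hit) := by
  induction deltas with
  | nil => rfl
  | cons d rest ih =>
    rw [loop_step, List.find?_cons]
    cases hp : placedB cx cz lx lz reserved min_x max_x min_z max_z shift_axis d
    · simp only [Bool.false_eq_true, if_false, ih]
    · simp only [if_true]

-- ===== VERDICT (by name: the statement is the Claim_ definition above) =====
theorem shift_rect_off_reserved_spec : Claim_equal_shift_rect_off_reserved := by
  intro cx cz lx lz reserved min_x max_x min_z max_z shift_axis _
  unfold Spec_shift_rect_off_reserved shift_rect_off_reserved shift_rect_off_reserved_alt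
  exact loop_eq_find cx cz lx lz reserved min_x max_x min_z max_z shift_axis _
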